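-- pv_equiv track=rewrite | github.com/Matt24905/E7032E-Cat-door-project | Software/Proxmark3/AndishFreyayV2.py | classify_and_convert
-- ===== SOURCE A (Python) =====
-- def classify_and_convert(data, threshold):
--     bits = []
--     current_value = data[0]
--     count = 0
--
--     for value in data:
--         if value == current_value:
--             count += 1
--         else:
--             # Classify the segment
--             if count < threshold:
--                 bits.append(current_value)
--             else:
--                 bits.extend([current_value, current_value])
--             # Reset for next segment
--             count = 1
--             current_value = value
--
--     # Handle the last segment
--     if count < threshold:
--         bits.append(current_value)
--     else:
--         bits.extend([current_value, current_value])
--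
--     return bits
-- ===== SOURCE B (Python) =====
-- def classify_and_convert(data, threshold):
--     # Staged passes: (1) boundary indices where a new run starts, (2) pair each
--     # start with the next boundary, (3) emit the segment value once or twice.
--     n = len(data)
--     starts = [i for i in range(n) if i == 0 or data[i] != data[i - 1]]
--     ends = starts[1:] + [n]
--     out = []
--     for a, b in zip(starts, ends):
--         if b - a < threshold:
--             out.append(data[a])
--         else:
--             out.extend([data[a], data[a]])
--     return out
-- ===== Notes on version B (the rewrite author's own statement) =====
-- stated objective: alternative
-- what changed: B works in staged passes over indices: it first computes the list of run-start boundary indices by comparing each position with its predecessor, zips each start with the next boundary to get segment extents, and emits data[a] once or twice per (a,b) pair - replacing A's single streaming pass with a running counter, change-detection branch and separate trailing-segment flush.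
import Mathlib
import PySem

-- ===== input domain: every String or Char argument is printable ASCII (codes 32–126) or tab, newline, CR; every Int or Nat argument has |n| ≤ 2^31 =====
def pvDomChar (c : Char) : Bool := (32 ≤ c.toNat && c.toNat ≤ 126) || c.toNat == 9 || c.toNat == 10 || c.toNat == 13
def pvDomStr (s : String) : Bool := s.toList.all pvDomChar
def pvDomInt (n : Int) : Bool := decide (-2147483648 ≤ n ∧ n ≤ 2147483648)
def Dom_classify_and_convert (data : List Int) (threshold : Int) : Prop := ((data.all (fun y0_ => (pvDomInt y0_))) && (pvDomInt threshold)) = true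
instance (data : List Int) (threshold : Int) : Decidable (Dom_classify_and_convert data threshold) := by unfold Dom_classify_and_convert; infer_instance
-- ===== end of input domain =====

-- B computes the run-start boundary indices in one indexed pass, pairs each start with the next
-- boundary, and emits the segment value once or twice per pair — replacing A's streaming counter
-- with change-detection branch and trailing-segment flush (alternative decomposition; no speed claim).

-- ===== PORT A =====
-- A: fold over data with state (bits, current_value, count); the last segment is flushed after the loop.
def classify_and_convert (data : List Int) (threshold : Int) : List Int :=
  match data with
  | [] => []   -- unreachable under Pre_ (Python raises IndexError at data[0])
  | d0 :: _ =>
    let st := data.foldl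
      (fun (s : List Int × Int × Int) value =>
        if value = s.2.1 then (s.1, s.2.1, s.2.2 + 1)
        else ((if s.2.2 < threshold then s.1 ++ [s.2.1] else s.1 ++ [s.2.1, s.2.1]), value, 1))
      ([], d0, 0)
    if st.2.2 < threshold then st.1 ++ [st.2.1] else st.1 ++ [st.2.1, st.2.1]

-- ===== PORT B =====
-- B's first pass: starts = [i for i in range(n) if i == 0 or data[i] != data[i-1]]
-- (for i ≥ 1 the Nat subtraction i-1 agrees with Python; at i = 0 the disjunction short-circuits).
def pvStarts (data : List Int) : List Nat :=
  (List.range data.length).filter (fun i => i == 0 || data.getD i 0 != data.getD (i - 1) 0)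

-- B's remaining passes: ends = starts[1:] + [n], then one fold over zip(starts, ends)
-- appending data[a] once (b - a < threshold) or twice.
def classify_and_convert_alt (data : List Int) (threshold : Int) : List Int :=
  ((pvStarts data).zip ((pvStarts data).drop 1 ++ [data.length])).foldl
    (fun out p =>
      if ((p.2 : Int) - (p.1 : Int)) < threshold then out ++ [data.getD p.1 0]
      else out ++ [data.getD p.1 0, data.getD p.1 0]) []

-- ===== PRECONDITION & SPEC =====
-- Pre_ excludes only the empty list, where Python A raises IndexError at data[0].
def Pre_classify_and_convert (data : List Int) (threshold : Int) : Prop := data ≠ []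
instance (data : List Int) (threshold : Int) : Decidable (Pre_classify_and_convert data threshold) := by unfold Pre_classify_and_convert; infer_instance
def pvWitness_classify_and_convert : List Int × Int := ([1, 1, 0, 1], 2)

def Spec_classify_and_convert (data : List Int) (threshold : Int) (out : List Int) : Prop := out = classify_and_convert_alt data threshold
instance (data : List Int) (threshold : Int) (out : List Int) : Decidable (Spec_classify_and_convert data threshold out) := by unfold Spec_classify_and_convert; infer_instance

-- ===== CLAIM (what is proved, stated in full; the proofs are below) =====
def Claim_equal_classify_and_convert : Prop := ∀ (data : List Int) (threshold : Int), Dom_classify_and_convert data threshold → Pre_classify_and_convert data threshold → Spec_classify_and_convert data threshold (classify_and_convert data threshold)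
-- ===== LEMMAS AND PROOFS =====

-- Proof-side run splitter: number of leading copies of v in the list, and the remainder.
def splitRun (v : Int) : List Int → Nat × List Int
  | [] => (0, [])
  | x :: xs => if x = v then ((splitRun v xs).1 + 1, (splitRun v xs).2) else (0, x :: xs)

theorem splitRun_len (v : Int) (l : List Int) : (splitRun v l).2.length ≤ l.length := by
  induction l with
  | nil => simp [splitRun]
  | cons x xs ih =>
    simp only [splitRun]
    split
    · exact Nat.le_succ_of_le ih
    · simp

theorem splitRun_decomp (v : Int) (l : List Int) :
    l = List.replicate (splitRun v l).1 v ++ (splitRun v l).2 := by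
  induction l with
  | nil => simp [splitRun]
  | cons x xs ih =>
    simp only [splitRun]
    by_cases hx : x = v
    · subst hx; rw [if_pos rfl]; simpa [List.replicate_succ] using ih
    · rw [if_neg hx]; simp

theorem splitRun_rest (v : Int) (l : List Int) :
    (splitRun v l).2 = [] ∨ ∃ w r, (splitRun v l).2 = w :: r ∧ w ≠ v := by
  induction l with
  | nil => left; simp [splitRun]
  | cons x xs ih =>
    simp only [splitRun]
    by_cases hx : x = v
    · rw [if_pos hx]; exact ih
    · rw [if_neg hx]; right; exact ⟨x, xs, rfl, hx⟩

-- Recursive characterisation of the change positions inside xs, previous element being v.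
def changes : Int → List Int → List Nat
  | _, [] => []
  | v, x :: xs => (if x = v then [] else [0]) ++ (changes x xs).map (· + 1)

-- Recursive characterisation of the starts list.
def startsRec : List Int → List Nat
  | [] => []
  | v :: xs => 0 :: (changes v xs).map (· + 1)

-- Bridge: the filtered index range of B's first pass equals the recursive characterisation.
theorem filter_range_eq_changes (v : Int) (xs : List Int) :
    (List.range xs.length).filter
        (fun i => ((v :: xs).getD (i + 1) 0) != ((v :: xs).getD i 0)) = changes v xs := by
  induction xs generalizing v with
  | nil => simp [changes]
  | cons x xs ih =>
    rw [List.length_cons, List.range_succ_eq_map, List.filter_cons]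
    simp only [List.getD_cons_succ, List.getD_cons_zero, changes]
    rw [List.filter_map]
    have hmap : ((List.range xs.length).filter
        (fun i => ((x :: xs).getD (i + 1) 0) != ((x :: xs).getD i 0))).map (· + 1)
        = (changes x xs).map (· + 1) := by rw [ih]
    by_cases hx : x = v
    · subst hx
      simp only [bne_self_eq_false, if_neg Bool.false_ne_true]
      rw [← hmap]; rfl
    · have hb : (x != v) = true := by simp [bne, hx]
      simp only [hb, if_neg hx]
      rw [← hmap]; rfl

theorem starts_eq_startsRec (data : List Int) : pvStarts data = startsRec data := by
  unfold pvStarts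
  cases data with
  | nil => simp [startsRec]
  | cons v xs =>
    rw [List.length_cons, List.range_succ_eq_map, List.filter_cons]
    simp only [startsRec, beq_self_eq_true, Bool.true_or]
    congr 1
    rw [List.filter_map, ← filter_range_eq_changes v xs]
    congr 1

-- The segment emitter (one pair of boundaries).
def emit (d : List Int) (t : Int) (p : Nat × Nat) : List Int :=
  if ((p.2 : Int) - (p.1 : Int)) < t then [d.getD p.1 0] else [d.getD p.1 0, d.getD p.1 0]

-- B as flatMap over the boundary pairs of startsRec.
def bCore (d : List Int) (t : Int) : List Int :=
  ((startsRec d).zip ((startsRec d).drop 1 ++ [d.length])).flatMap (emit d t)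

theorem alt_eq_bCore (data : List Int) (t : Int) :
    classify_and_convert_alt data t = bCore data t := by
  unfold classify_and_convert_alt bCore
  rw [starts_eq_startsRec]
  rw [show (fun (out : List Int) (p : Nat × Nat) =>
      if ((p.2 : Int) - (p.1 : Int)) < t then out ++ [data.getD p.1 0]
      else out ++ [data.getD p.1 0, data.getD p.1 0])
    = (fun out p => out ++ emit data t p) from by funext out p; unfold emit; split <;> rfl]
  rw [PySem.List.foldl_append_eq_flatMap]
  simp

-- changes after stripping a leading run of v's: shift by the run length.
theorem changes_splitRun (v : Int) (xs : List Int) :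
    changes v xs = (changes v (splitRun v xs).2).map (· + (splitRun v xs).1) := by
  induction xs generalizing v with
  | nil => simp [changes, splitRun]
  | cons x xs ih =>
    by_cases hx : x = v
    · subst hx
      simp only [changes, splitRun, reduceIte, List.nil_append]
      rw [ih, List.map_map]
      congr 1
    · simp [changes, splitRun, hx]

-- changes over the remainder (empty or starting with an element ≠ v) equals its startsRec.
theorem changes_rest_eq_startsRec (v : Int) (xs : List Int) :
    changes v (splitRun v xs).2 = startsRec (splitRun v xs).2 := by
  rcases splitRun_rest v xs with h | ⟨w, r, h, hw⟩
  · rw [h]; rfl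
  · rw [h]; simp [changes, startsRec, hw]

-- Key geometric fact: starts of v::xs = 0 followed by starts of the remainder shifted by k+1.
theorem startsRec_cons (v : Int) (xs : List Int) :
    startsRec (v :: xs) = 0 :: (startsRec (splitRun v xs).2).map (· + ((splitRun v xs).1 + 1)) := by
  simp only [startsRec]
  congr 1
  rw [changes_splitRun, changes_rest_eq_startsRec, List.map_map]
  congr 1

-- Emitting a shifted pair over replicate (k+1) v ++ rest equals emitting the pair over rest.
theorem emit_shift (rest : List Int) (v : Int) (k : Nat) (t : Int) (p : Nat × Nat) :
    emit (List.replicate (k + 1) v ++ rest) t (p.1 + (k + 1), p.2 + (k + 1)) = emit rest t p := by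
  unfold emit
  have hg : (List.replicate (k + 1) v ++ rest).getD (p.1 + (k + 1)) 0 = rest.getD p.1 0 := by
    simp [List.getD, List.getElem?_append_right
      (by simp : (List.replicate (k + 1) v).length ≤ p.1 + (k + 1))]
  simp only [hg]
  have hc : ((p.2 + (k + 1) : Nat) : Int) - ((p.1 + (k + 1) : Nat) : Int) = (p.2 : Int) - p.1 := by
    push_cast; ring
  rw [hc]

-- The first boundary pair (0, k+1) emits the first run's value once or twice.
theorem emit_first (xs : List Int) (v t : Int) (k : Nat) :
    emit (v :: xs) t (0, k + 1) = if t ≤ (k : Int) + 1 then [v, v] else [v] := by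
  unfold emit
  simp only [List.getD_cons_zero]
  have hc : ((k + 1 : Nat) : Int) - ((0 : Nat) : Int) = (k : Int) + 1 := by push_cast; ring
  rw [hc]
  by_cases ht : t ≤ (k : Int) + 1
  · rw [if_neg (by omega), if_pos ht]
  · rw [if_pos (by omega), if_neg ht]

-- Proof-side run recursion (fuel = length bound).
def altGo (t : Int) : Nat → List Int → List Int
  | _, [] => []
  | 0, _ :: _ => []
  | n + 1, v :: rest =>
    (if t ≤ ((splitRun v rest).1 : Int) + 1 then [v, v] else [v]) ++
      altGo t n (splitRun v rest).2

-- fuel irrelevance for altGo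
theorem altGo_congr (t : Int) : ∀ (n m : Nat) (l : List Int), l.length ≤ n → l.length ≤ m →
    altGo t n l = altGo t m l := by
  intro n
  induction n with
  | zero =>
    intro m l h _
    have hl : l = [] := List.eq_nil_of_length_eq_zero (Nat.le_zero.mp h)
    subst hl; cases m <;> simp [altGo]
  | succ n ih =>
    intro m l h hm
    cases l with
    | nil => cases m <;> simp [altGo]
    | cons v rest =>
      cases m with
      | zero => simp at hm
      | succ m =>
        simp only [altGo]
        have h1 : (splitRun v rest).2.length ≤ n := le_trans (splitRun_len v rest) (by simpa using h)
        have h2 : (splitRun v rest).2.length ≤ m := le_trans (splitRun_len v rest) (by simpa using hm)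
        rw [ih _ _ h1 h2]

-- bCore satisfies the run recursion.
theorem bCore_eq_altGo (t : Int) : ∀ (n : Nat) (l : List Int), l.length ≤ n →
    bCore l t = altGo t n l := by
  intro n
  induction n with
  | zero =>
    intro l h
    have hl : l = [] := List.eq_nil_of_length_eq_zero (Nat.le_zero.mp h)
    subst hl; rfl
  | succ n ih =>
    intro l h
    cases l with
    | nil => rfl
    | cons v xs =>
      have hxd := splitRun_decomp v xs
      have hxl := splitRun_len v xs
      have hsc := startsRec_cons v xs
      have hre := splitRun_rest v xs
      rcases hsr : splitRun v xs with ⟨k, rest⟩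
      rw [hsr] at hxd hxl hsc hre
      simp only at hxd hxl hsc hre
      have hdec : v :: xs = List.replicate (k + 1) v ++ rest := by
        rw [List.replicate_succ, List.cons_append, ← hxd]
      have hlen : xs.length = k + rest.length := by
        rw [hxd]; simp
      have hrlen : rest.length ≤ n := by
        simp only [List.length_cons] at h; omega
      simp only [altGo, hsr]
      rw [← ih rest hrlen]
      unfold bCore
      rw [hsc]
      rcases hre with hre | ⟨w, r, hre, hw⟩
      · -- rest = []: a single segment covering the whole list
        subst hre
        simp only [startsRec, List.map_nil, List.drop_succ_cons, List.drop_nil,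
          List.nil_append, List.zip_cons_cons, List.zip_nil_left, List.flatMap_cons,
          List.flatMap_nil, List.append_nil]
        have hn : (v :: xs).length = k + 1 := by simp [hlen]
        rw [hn, emit_first]
      · -- rest = w :: r with w ≠ v: first segment, then a shifted copy of rest's segments
        have hsrest : startsRec rest = 0 :: (changes w r).map (· + 1) := by rw [hre]; rfl
        rw [hsrest]
        simp only [List.map_cons, Nat.zero_add, List.drop_succ_cons, List.drop_zero,
          List.cons_append, List.zip_cons_cons, List.flatMap_cons]
        congr 1
        · -- first pair: (0, k+1)
          exact emit_first xs v t k
        · -- remaining pairs: a shifted copy of rest's boundary pairs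
          have hnn : (v :: xs).length = rest.length + (k + 1) := by
            simp [hlen]; omega
          rw [hnn]
          have hz : ((k + 1) :: ((changes w r).map (· + 1)).map (· + (k + 1))).zip
                ((((changes w r).map (· + 1)).map (· + (k + 1))) ++ [rest.length + (k + 1)])
              = ((0 :: (changes w r).map (· + 1)).zip
                  ((changes w r).map (· + 1) ++ [rest.length])).map
                  (Prod.map (· + (k + 1)) (· + (k + 1))) := by
            rw [← List.zip_map]
            simp only [List.map_cons, List.map_append, List.map_map, Nat.zero_add, List.map_nil]
          rw [hz, List.flatMap_map]
          have hfun : (fun p => emit (v :: xs) t (Prod.map (· + (k + 1)) (· + (k + 1)) p))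
              = emit rest t := by
            funext p
            show emit (v :: xs) t (p.1 + (k + 1), p.2 + (k + 1)) = emit rest t p
            rw [hdec]; exact emit_shift rest v k t p
          rw [hfun]

-- A's loop step and final flush, named so the invariant below can speak about them.
def pvStep (threshold : Int) (s : List Int × Int × Int) (value : Int) : List Int × Int × Int :=
  if value = s.2.1 then (s.1, s.2.1, s.2.2 + 1)
  else ((if s.2.2 < threshold then s.1 ++ [s.2.1] else s.1 ++ [s.2.1, s.2.1]), value, 1)

def pvFinish (threshold : Int) (s : List Int × Int × Int) : List Int :=
  if s.2.2 < threshold then s.1 ++ [s.2.1] else s.1 ++ [s.2.1, s.2.1]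

theorem altGo_cons (t v : Int) (xs : List Int) :
    altGo t (xs.length + 1) (v :: xs) =
      (if t ≤ ((splitRun v xs).1 : Int) + 1 then [v, v] else [v]) ++
        altGo t (splitRun v xs).2.length (splitRun v xs).2 := by
  simp only [altGo]
  rw [altGo_congr t xs.length _ _ (splitRun_len v xs) le_rfl]

-- Invariant for A: flushing the fold from state (bits, cv, c) over l equals bits, then the open
-- cv-run (count c plus the leading cv's of l), then the run recursion on the remainder.
theorem pv_main (t : Int) (l : List Int) : ∀ (bits : List Int) (cv c : Int),
    pvFinish t (l.foldl (pvStep t) (bits, cv, c)) =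
      bits ++ ((if t ≤ c + ((splitRun cv l).1 : Int) then [cv, cv] else [cv]) ++
        altGo t (splitRun cv l).2.length (splitRun cv l).2) := by
  induction l with
  | nil =>
    intro bits cv c
    simp only [List.foldl_nil, pvFinish, splitRun, altGo, Nat.cast_zero, Int.add_zero,
      List.length_nil]
    split_ifs <;> first | (exfalso; omega) | simp
  | cons x xs ih =>
    intro bits cv c
    simp only [List.foldl_cons, pvStep, splitRun]
    by_cases hx : x = cv
    · simp only [if_pos hx]
      rw [ih]
      have harith : c + (((splitRun cv xs).1 + 1 : Nat) : Int) = c + 1 + ((splitRun cv xs).1 : Int) := by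
        push_cast; ring
      rw [harith]
    · simp only [if_neg hx]
      rw [ih]
      simp only [List.length_cons, Nat.cast_zero, Int.add_zero]
      rw [altGo_cons]
      have h1 : ((1 : Int) + ((splitRun x xs).1 : Int)) = ((splitRun x xs).1 : Int) + 1 := by ring
      rw [h1]
      by_cases hc : c < t
      · rw [if_pos hc, if_neg (show ¬ t ≤ c from by omega)]
        simp
      · rw [if_neg hc, if_pos (show t ≤ c from by omega)]
        simp

-- ===== VERDICT (by name: the statement is the Claim_ definition above) =====
theorem classify_and_convert_spec : Claim_equal_classify_and_convert := by
  intro data threshold _ hpre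
  unfold Spec_classify_and_convert
  match data with
  | [] => exact absurd rfl hpre
  | d0 :: rest =>
    rw [alt_eq_bCore, bCore_eq_altGo threshold (d0 :: rest).length _ le_rfl]
    show pvFinish threshold ((d0 :: rest).foldl (pvStep threshold) ([], d0, 0)) = _
    simp only [List.foldl_cons, pvStep, if_true]
    rw [pv_main, List.length_cons, altGo_cons]
    have h1 : (0 : Int) + 1 + ((splitRun d0 rest).1 : Int) = ((splitRun d0 rest).1 : Int) + 1 := by
      ring
    rw [h1]
    simp
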